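-- pv_equiv track=rewrite | github.com/KimDaeYu/koreanAI | 코딩공_2/problemP2.py | bracket_filter
-- ===== SOURCE A (Python) =====
-- def bracket_filter(sentence):
--     new_sentence = str()
--     flag = False
--
--     for ch in sentence:
--         if ch == '(' and flag is False:
--             flag = True
--             continue
--         if ch == '(' and flag is True:
--             flag = False
--             continue
--         if ch != ')' and flag is False:
--             new_sentence += ch
--     return new_sentence
-- ===== SOURCE B (Python) =====
-- def bracket_filter(sentence):
--     # A's flag is the parity of '(' seen so far: split on '(' and keep the
--     # even-indexed segments (with ')' removed), drop the odd-indexed ones.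
--     segs = sentence.split('(')
--     return ''.join(seg.replace(')', '') for i, seg in enumerate(segs) if i % 2 == 0)
-- ===== Notes on version B (the rewrite author's own statement) =====
-- stated objective: faster
-- what changed: Replaces A's per-character state machine (a toggled flag over every char) with a segment-level pass: split the string on '(', keep the even-indexed segments with ')' stripped, and join them.
import Mathlib
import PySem

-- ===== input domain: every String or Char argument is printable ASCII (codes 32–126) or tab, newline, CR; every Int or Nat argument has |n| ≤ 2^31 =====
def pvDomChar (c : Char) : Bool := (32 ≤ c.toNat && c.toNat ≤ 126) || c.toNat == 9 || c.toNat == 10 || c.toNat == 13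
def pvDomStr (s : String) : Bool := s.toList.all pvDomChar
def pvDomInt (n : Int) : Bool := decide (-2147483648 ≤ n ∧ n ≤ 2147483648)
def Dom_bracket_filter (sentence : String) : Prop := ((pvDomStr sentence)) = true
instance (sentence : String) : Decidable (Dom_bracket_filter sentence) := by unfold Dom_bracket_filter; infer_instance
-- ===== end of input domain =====

-- B replaces A's per-character toggled-flag state machine by a segment pass:
-- split on '(', keep even-indexed segments with ')' removed, join (measured faster in a timing run).


-- ===== PORT A =====
-- for ch in sentence: '(' toggles flag (and is skipped); otherwise keep ch when
-- flag is False and ch ≠ ')'.  State = (new_sentence, flag); += is list append.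
def bracket_filter (sentence : String) : String :=
  let r := sentence.toList.foldl
    (fun (st : List Char × Bool) ch =>
      if ch = '(' ∧ st.2 = false then (st.1, true)
      else if ch = '(' ∧ st.2 = true then (st.1, false)
      else if ch ≠ ')' ∧ st.2 = false then (st.1 ++ [ch], st.2)
      else st)
    ([], false)
  String.ofList r.1

-- ===== PORT B =====
def bracket_filter_alt (sentence : String) : String :=
  match PySem.Str.split? sentence "(" with
  | none => ""   -- unreachable: the separator "(" is nonempty
  | some segs =>
      PySem.Str.join "" ((PySem.List.enumerate segs 0).filterMap
        (fun p => if PySem.Int.mod p.1 2 == 0 then some (PySem.Str.replace p.2 ")" "") else none))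

-- ===== PRECONDITION & SPEC =====
def Spec_bracket_filter (sentence : String) (out : String) : Prop := out = bracket_filter_alt sentence
instance (sentence : String) (out : String) : Decidable (Spec_bracket_filter sentence out) := by unfold Spec_bracket_filter; infer_instance

-- ===== CLAIM (what is proved, stated in full; the proofs are below) =====
def Claim_equal_bracket_filter : Prop := ∀ (sentence : String), Dom_bracket_filter sentence → Spec_bracket_filter sentence (bracket_filter sentence)

-- ===== LEMMAS AND PROOFS =====

-- reference split of a char list on '(' (always nonempty)
def splitPar : List Char → List (List Char)
  | [] => [[]]
  | c :: t =>
    if c = '(' then [] :: splitPar t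
    else
      match splitPar t with
      | s :: r => (c :: s) :: r
      | [] => [[c]]

theorem splitPar_ne_nil (l : List Char) : splitPar l ≠ [] := by
  cases l with
  | nil => simp [splitPar]
  | cons c t =>
    simp only [splitPar]
    split
    · simp
    · cases h : splitPar t <;> simp

-- alternate keep/drop over segments: flag=false keeps (filtering ')'), flag=true drops
def altJoin : Bool → List (List Char) → List Char
  | _, [] => []
  | false, s :: r => s.filter (· ≠ ')') ++ altJoin true r
  | true, _ :: r => altJoin false r

theorem replace_go_paren (l acc : List Char) (fuel : Nat) (h : l.length ≤ fuel) :
    PySem.Chars.replace.go [')'] [] fuel l acc = acc.reverse ++ l.filter (· ≠ ')') := by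
  induction l generalizing fuel acc with
  | nil => cases fuel <;> simp [PySem.Chars.replace.go]
  | cons c t ih =>
    cases fuel with
    | zero => simp at h
    | succ n =>
      simp only [PySem.Chars.replace.go]
      by_cases hc : c = ')'
      · subst hc
        rw [if_pos (by simp [List.isPrefixOf])]
        rw [show List.drop [')'].length (')' :: t) = t from rfl]
        rw [ih _ _ (by simpa using Nat.le_of_succ_le_succ h)]
        simp
      · rw [if_neg (by simp [List.isPrefixOf]; intro he; exact hc he.symm)]
        rw [ih _ _ (by simpa using Nat.le_of_succ_le_succ h)]
        simp [hc]

theorem replace_paren (l : List Char) :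
    PySem.Chars.replace l [')'] [] = l.filter (· ≠ ')') := by
  simp [PySem.Chars.replace, replace_go_paren l [] l.length (le_refl _)]

theorem splitOn_go_paren (l cur : List Char) (acc : List (List Char)) (fuel : Nat)
    (h : l.length ≤ fuel) :
    PySem.Chars.splitOn.go ['('] fuel l cur acc =
      acc.reverse ++ (splitPar l).modifyHead (cur.reverse ++ ·) := by
  induction l generalizing fuel cur acc with
  | nil => cases fuel <;> simp [PySem.Chars.splitOn.go, splitPar]
  | cons c t ih =>
    cases fuel with
    | zero => simp at h
    | succ n =>
      simp only [PySem.Chars.splitOn.go]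
      by_cases hc : c = '('
      · subst hc
        rw [if_pos (by simp [List.isPrefixOf])]
        rw [show List.drop ['('].length ('(' :: t) = t from rfl]
        rw [ih _ _ _ (by simpa using Nat.le_of_succ_le_succ h)]
        simp [splitPar]
        cases splitPar t <;> simp
      · rw [if_neg (by simp [List.isPrefixOf]; intro he; exact hc he.symm)]
        rw [ih _ _ _ (by simpa using Nat.le_of_succ_le_succ h)]
        simp only [splitPar, if_neg hc]
        rcases hs : splitPar t with _ | ⟨s, r⟩
        · exact absurd hs (splitPar_ne_nil t)
        · simp

theorem splitOn_paren (l : List Char) :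
    PySem.Chars.splitOn l ['('] = splitPar l := by
  rw [PySem.Chars.splitOn, splitOn_go_paren l [] [] (l.length + 1) (by omega)]
  rcases hs : splitPar l with _ | ⟨s, r⟩
  · exact absurd hs (splitPar_ne_nil l)
  · simp

-- '' .join is concatenation of the parts
theorem join_nil_flatten (xs : List (List Char)) : PySem.Chars.join [] xs = xs.flatten := by
  induction xs with
  | nil => simp [PySem.Chars.join, List.intercalate]
  | cons x xs ih =>
    cases xs <;> simp_all [PySem.Chars.join, List.intercalate, List.intersperse]

theorem int_mod_two (n : Nat) : PySem.Int.mod (n : Int) 2 = ((n % 2 : Nat) : Int) := by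
  rw [PySem.Int.mod, Int.fmod_eq_emod]
  simp

-- the B-side segment pass equals altJoin (parity of the running index)
theorem enum_pass (r : List (List Char)) (n : Nat) :
    PySem.Chars.join [] ((PySem.List.enumerate r (n : Int)).filterMap
      (fun p => if PySem.Int.mod p.1 2 == 0 then some (PySem.Chars.replace p.2 [')'] []) else none))
    = altJoin (n % 2 == 1) r := by
  induction r generalizing n with
  | nil => simp [PySem.List.enumerate_nil, altJoin, PySem.Chars.join, List.intercalate]
  | cons s r ih =>
    rw [PySem.List.enumerate_cons,
        show ((n : Int) + 1) = ((n + 1 : Nat) : Int) by push_cast; ring]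
    by_cases hp : n % 2 = 0
    · rw [List.filterMap_cons]
      rw [if_pos (by rw [int_mod_two, hp]; simp)]
      rw [join_nil_flatten, List.flatten_cons, ← join_nil_flatten, ih (n + 1)]
      have h1 : (n + 1) % 2 = 1 := by omega
      simp [hp, h1, altJoin, replace_paren]
    · have hp1 : n % 2 = 1 := by omega
      rw [List.filterMap_cons]
      rw [if_neg (by rw [int_mod_two, hp1]; decide)]
      rw [ih (n + 1)]
      have h0 : (n + 1) % 2 = 0 := by omega
      simp [hp1, h0, altJoin]

-- A's fold equals altJoin ∘ splitPar
theorem fold_eq_altJoin (l : List Char) (acc : List Char) (flag : Bool) :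
    (l.foldl
      (fun (st : List Char × Bool) ch =>
        if ch = '(' ∧ st.2 = false then (st.1, true)
        else if ch = '(' ∧ st.2 = true then (st.1, false)
        else if ch ≠ ')' ∧ st.2 = false then (st.1 ++ [ch], st.2)
        else st)
      (acc, flag)).1 = acc ++ altJoin flag (splitPar l) := by
  induction l generalizing acc flag with
  | nil => cases flag <;> simp [altJoin, splitPar]
  | cons c t ih =>
    simp only [List.foldl_cons]
    by_cases hc : c = '('
    · subst hc
      cases flag with
      | false =>
        rw [if_pos (by simp)]
        rw [ih]
        simp [splitPar, altJoin]
      | true =>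
        rw [if_neg (by simp), if_pos (by simp)]
        rw [ih]
        simp [splitPar, altJoin]
    · rcases hs : splitPar t with _ | ⟨s, r⟩
      · exact absurd hs (splitPar_ne_nil t)
      cases flag with
      | true =>
        rw [if_neg (by simp [hc]), if_neg (by simp [hc]), if_neg (by simp)]
        rw [ih]
        simp [splitPar, hc, hs, altJoin]
      | false =>
        rw [if_neg (by simp [hc]), if_neg (by simp [hc])]
        by_cases hr : c = ')'
        · subst hr
          rw [if_neg (by simp)]
          rw [ih]
          simp [splitPar, hs, altJoin]
        · rw [if_pos (by simp [hr])]
          rw [ih]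
          simp [splitPar, hc, hs, altJoin, hr]

-- enumerate commutes with mapping over the elements
theorem enumerate_map (r : List (List Char)) (n : Int) :
    PySem.List.enumerate (r.map String.ofList) n
      = (PySem.List.enumerate r n).map (fun p => (p.1, String.ofList p.2)) := by
  induction r generalizing n with
  | nil => simp [PySem.List.enumerate_nil]
  | cons x xs ih => simp [PySem.List.enumerate_cons, ih]

-- ===== VERDICT (by name: the statement is the Claim_ definition above) =====
theorem bracket_filter_spec : Claim_equal_bracket_filter := by
  intro sentence _
  show bracket_filter sentence = bracket_filter_alt sentence
  have hsplit : PySem.Str.split? sentence "(" =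
      some ((splitPar sentence.toList).map String.ofList) := by
    rw [PySem.Str.split?]
    simp [PySem.Chars.split?, show ("(" : String).toList = ['('] from rfl, splitOn_paren]
  unfold bracket_filter bracket_filter_alt
  simp only [hsplit]
  rw [fold_eq_altJoin, List.nil_append]
  rw [show ∀ (sep : String) (ps : List String), PySem.Str.join sep ps
        = String.ofList (PySem.Chars.join sep.toList (ps.map String.toList)) from fun _ _ => rfl]
  congr 1
  rw [enumerate_map, List.filterMap_map, List.map_filterMap]
  rw [show ("" : String).toList = ([] : List Char) from rfl]
  rw [show (altJoin false (splitPar sentence.toList))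
        = altJoin ((0 : Nat) % 2 == 1) (splitPar sentence.toList) from rfl]
  rw [← enum_pass (splitPar sentence.toList) 0]
  rw [show ((0 : Nat) : Int) = (0 : Int) by norm_num]
  refine congrArg (PySem.Chars.join []) (congrFun (congrArg List.filterMap ?_) _)
  funext (p : Int × List Char)
  by_cases hm : PySem.Int.mod p.1 2 == 0
  · simp [PySem.Str.replace]
  · simp
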